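-- pv_equiv track=rewrite | github.com/petertzy/CleverGit | clevergit/ui/widgets/diff_viewer.py | _enhance_diff_formatting
-- ===== SOURCE A (Python) =====
-- def _enhance_diff_formatting(diff_text: str) -> str:
--     """Enhance diff formatting with better visual separators."""
--     if not diff_text:
--         return diff_text
--
--     lines = diff_text.split("\n")
--     enhanced_lines = []
--
--     for i, line in enumerate(lines):
--         # Add visual separator before each file
--         if line.startswith("diff --git"):
--             if i > 0:  # Don't add separator before first file
--                 enhanced_lines.append("")  # Empty line for spacing
--                 enhanced_lines.append("=" * 80)  # Separator line
--                 enhanced_lines.append("")  # Empty line for spacing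
--
--         enhanced_lines.append(line)
--
--     return "\n".join(enhanced_lines)
-- ===== SOURCE B (Python) =====
-- def _enhance_diff_formatting(diff_text: str) -> str:
--     """Enhance diff formatting with better visual separators."""
--     if not diff_text:
--         return diff_text
--     return diff_text.replace("\ndiff --git", "\n\n" + "=" * 80 + "\n\ndiff --git")
-- ===== Notes on version B (the rewrite author's own statement) =====
-- stated objective: simpler
-- what changed: Replaced the per-line enumerate/startswith loop with a single str.replace that substitutes each newline-preceded diff header occurrence by the collapsed separator-plus-header string.
import Mathlib
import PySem

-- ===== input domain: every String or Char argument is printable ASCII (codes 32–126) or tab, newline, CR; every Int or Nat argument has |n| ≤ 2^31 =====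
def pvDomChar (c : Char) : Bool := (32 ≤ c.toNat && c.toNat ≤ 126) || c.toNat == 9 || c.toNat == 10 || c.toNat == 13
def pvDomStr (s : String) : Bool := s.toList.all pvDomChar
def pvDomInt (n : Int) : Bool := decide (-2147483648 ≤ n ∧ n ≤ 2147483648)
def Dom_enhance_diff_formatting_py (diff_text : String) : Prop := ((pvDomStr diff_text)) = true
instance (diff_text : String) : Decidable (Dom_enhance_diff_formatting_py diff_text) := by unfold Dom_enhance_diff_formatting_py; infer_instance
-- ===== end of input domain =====

-- B replaces A's per-line enumerate/startswith loop by one substitution of "\ndiff --git"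
-- with the collapsed separator string (objective: simpler).

-- ===== PORT A =====
-- line-by-line loop: split on "\n", insert "", "="*80, "" before each header line with i > 0, rejoin
def enhance_diff_formatting_py (diff_text : String) : String :=
  if diff_text == "" then diff_text
  else
    let lines := PySem.Chars.splitOn diff_text.toList ['\n']
    let enhanced :=
      (PySem.List.enumerate lines).foldl
        (fun acc il =>
          let acc :=
            if PySem.Chars.startswith il.2 ("diff --git".toList) then
              if il.1 > 0 then acc ++ [[], List.replicate 80 '=', []] else acc
            else acc
          acc ++ [il.2]) []
    String.ofList (PySem.Chars.join ['\n'] enhanced)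

-- ===== PORT B =====
def enhance_diff_formatting_py_alt (diff_text : String) : String :=
  if diff_text == "" then diff_text
  else
    PySem.Str.replace diff_text "\ndiff --git"
      (String.ofList ('\n' :: '\n' :: (List.replicate 80 '=' ++ '\n' :: '\n' :: "diff --git".toList)))

-- ===== PRECONDITION & SPEC =====
def Spec_enhance_diff_formatting_py (diff_text : String) (out : String) : Prop := out = enhance_diff_formatting_py_alt diff_text
instance (diff_text : String) (out : String) : Decidable (Spec_enhance_diff_formatting_py diff_text out) := by unfold Spec_enhance_diff_formatting_py; infer_instance

-- ===== CLAIM (what is proved, stated in full; the proofs are below) =====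
def Claim_equal_enhance_diff_formatting_py : Prop := ∀ (diff_text : String), Dom_enhance_diff_formatting_py diff_text → Spec_enhance_diff_formatting_py diff_text (enhance_diff_formatting_py diff_text)

-- ===== LEMMAS AND PROOFS =====

-- abbreviations for the constants of the two programs
def pvPat0 : List Char := "diff --git".toList
def pvEq80 : List Char := List.replicate 80 '='
def pvPat : List Char := '\n' :: pvPat0
def pvRep : List Char := '\n' :: '\n' :: (pvEq80 ++ '\n' :: '\n' :: pvPat0)
def pvSep4 : List Char := '\n' :: '\n' :: (pvEq80 ++ ['\n', '\n'])

-- the common recursion both programs compute: replace "\ndiff --git" by pvRep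
def pvRepl : List Char → List Char
  | [] => []
  | c :: t =>
    if pvPat.isPrefixOf (c :: t) then pvRep ++ pvRepl (t.drop 10) else c :: pvRepl t
termination_by l => l.length
decreasing_by all_goals (simp [List.length_drop]; try omega)

-- split of a char list on '\n'
def pvPre1 (c : Char) : List (List Char) → List (List Char)
  | [] => [[c]]
  | h :: r => (c :: h) :: r

def pvLines : List Char → List (List Char)
  | [] => [[]]
  | c :: t => if c = '\n' then [] :: pvLines t else pvPre1 c (pvLines t)

def pvPre (a : List Char) : List (List Char) → List (List Char)
  | [] => [a]
  | h :: r => (a ++ h) :: r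

lemma pvLines_ne_nil (cs : List Char) : pvLines cs ≠ [] := by
  cases cs with
  | nil => simp [pvLines]
  | cons c t =>
    simp only [pvLines]
    split
    · simp
    · cases h : pvLines t <;> simp [pvPre1]

-- invariant of PySem.Chars.splitOn.go for sep = ['\n']
lemma pvSplitOn_go_eq (fuel : Nat) : ∀ (l cur : List Char) (acc : List (List Char)),
    l.length ≤ fuel →
    PySem.Chars.splitOn.go ['\n'] fuel l cur acc = acc.reverse ++ pvPre cur.reverse (pvLines l) := by
  induction fuel with
  | zero =>
    intro l cur acc h
    have : l = [] := by cases l <;> simp_all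
    subst this
    simp [PySem.Chars.splitOn.go, pvLines, pvPre]
  | succ n ih =>
    intro l cur acc h
    cases l with
    | nil => simp [PySem.Chars.splitOn.go, pvLines, pvPre]
    | cons c rest =>
      simp only [PySem.Chars.splitOn.go]
      by_cases hc : c = '\n'
      · subst hc
        rw [if_pos (by simp [List.isPrefixOf])]
        have hdr : List.drop (['\n'] : List Char).length ('\n' :: rest) = rest := rfl
        rw [hdr, ih rest [] (cur.reverse :: acc) (by simpa using Nat.le_of_succ_le_succ h)]
        simp [pvLines, pvPre]
        cases hl : pvLines rest with
        | nil => exact absurd hl (pvLines_ne_nil rest)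
        | cons h' r' => simp [pvPre]
      · rw [if_neg (by simp [List.isPrefixOf]; intro h'; exact absurd h'.symm hc)]
        rw [ih rest (c :: cur) acc (by simpa using Nat.le_of_succ_le_succ h)]
        simp only [pvLines, if_neg hc, List.reverse_cons]
        cases hl : pvLines rest with
        | nil => exact absurd hl (pvLines_ne_nil rest)
        | cons h' r' => simp [pvPre, pvPre1]

lemma pvSplitOn_eq (cs : List Char) : PySem.Chars.splitOn cs ['\n'] = pvLines cs := by
  unfold PySem.Chars.splitOn
  rw [pvSplitOn_go_eq (cs.length + 1) cs [] [] (by omega)]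
  cases hl : pvLines cs with
  | nil => exact absurd hl (pvLines_ne_nil cs)
  | cons h r => simp [pvPre]

-- invariant of PySem.Chars.replace.go for our pattern
lemma pvReplace_go_eq (fuel : Nat) : ∀ (l acc : List Char),
    l.length ≤ fuel →
    PySem.Chars.replace.go pvPat pvRep fuel l acc = acc.reverse ++ pvRepl l := by
  induction fuel with
  | zero =>
    intro l acc h
    have : l = [] := by cases l <;> simp_all
    subst this
    simp [PySem.Chars.replace.go, pvRepl]
  | succ n ih =>
    intro l acc h
    cases l with
    | nil => simp [PySem.Chars.replace.go, pvRepl]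
    | cons c t =>
      rw [pvRepl]
      simp only [PySem.Chars.replace.go]
      by_cases hp : pvPat.isPrefixOf (c :: t) = true
      · rw [if_pos hp, if_pos hp]
        have hlen : (List.drop pvPat.length (c :: t)).length ≤ n := by
          simp [List.length_drop, pvPat, pvPat0] at *
          omega
        rw [ih _ (pvRep.reverse ++ acc) hlen]
        have hdrop : List.drop pvPat.length (c :: t) = t.drop 10 := by
          simp [pvPat, pvPat0]
        rw [hdrop]
        simp
      · rw [if_neg hp, if_neg hp]
        rw [ih t (c :: acc) (by simpa using Nat.le_of_succ_le_succ h)]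
        simp

lemma pvReplace_eq (cs : List Char) :
    PySem.Chars.replace cs pvPat pvRep = pvRepl cs := by
  unfold PySem.Chars.replace
  rw [if_neg (by simp [pvPat])]
  simpa using pvReplace_go_eq cs.length cs [] (le_refl _)

-- the A-side tail: each subsequent line joined with '\n', separator inserted before headers
def pvAtail (ls : List (List Char)) : List Char :=
  ls.flatMap (fun l => if pvPat0.isPrefixOf l then pvSep4 ++ l else '\n' :: l)

-- header-prefix test passes from a string to its first line (p contains no '\n')
lemma pvPrefix_head : ∀ (t : List Char) (p : List Char), (∀ c ∈ p, c ≠ '\n') →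
    p.isPrefixOf t = p.isPrefixOf (pvLines t).headI := by
  intro t
  induction t with
  | nil =>
    intro p _
    simp [pvLines]
  | cons c t' ih =>
    intro p hp
    cases p with
    | nil => simp [List.isPrefixOf]
    | cons d p' =>
      by_cases hc : c = '\n'
      · subst hc
        have hd : d ≠ '\n' := hp d (by simp)
        simp [pvLines, List.isPrefixOf, hd]
      · simp only [pvLines, if_neg hc]
        cases hl : pvLines t' with
        | nil => exact absurd hl (pvLines_ne_nil t')
        | cons h' r' =>
          simp only [pvPre1, List.headI, List.isPrefixOf]
          have := ih p' (fun x hx => hp x (by simp [hx]))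
          rw [hl] at this
          simp only [List.headI] at this
          rw [this]

-- consuming a '\n'-free prefix goes through pvRepl untouched
lemma pvRepl_prefix : ∀ (p u : List Char), (∀ c ∈ p, c ≠ '\n') → p.isPrefixOf u = true →
    pvRepl u = p ++ pvRepl (u.drop p.length) := by
  intro p
  induction p with
  | nil => intro u _ _; simp
  | cons d p' ih =>
    intro u hp hpre
    cases u with
    | nil => simp [List.isPrefixOf] at hpre
    | cons c u' =>
      simp only [List.isPrefixOf, Bool.and_eq_true, beq_iff_eq] at hpre
      obtain ⟨hdc, hpre'⟩ := hpre
      subst hdc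
      have hd : d ≠ '\n' := hp d (by simp)
      rw [pvRepl, if_neg (by simp [pvPat, List.isPrefixOf]; intro h; exact absurd h.symm hd)]
      rw [ih u' (fun x hx => hp x (by simp [hx])) hpre']
      simp

lemma pvPat0_no_nl : ∀ c ∈ pvPat0, c ≠ '\n' := by
  have h : pvPat0.all (fun c => c != '\n') = true := by decide
  intro c hc
  simpa using List.all_eq_true.mp h c hc

lemma pvRep_eq_sep4_pat0 : pvRep = pvSep4 ++ pvPat0 := by
  simp [pvRep, pvSep4]

-- MAIN: the first line plus the separator-joined tail is exactly the replace recursion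
lemma pvMainAux : ∀ (n : Nat) (cs : List Char), cs.length ≤ n → ∀ (h : List Char) (r : List (List Char)),
    pvLines cs = h :: r → h ++ pvAtail r = pvRepl cs := by
  intro n
  induction n with
  | zero =>
    intro cs hn h r hl
    have : cs = [] := by cases cs <;> simp_all
    subst this
    simp [pvLines] at hl
    obtain ⟨h1, h2⟩ := hl
    subst h1; subst h2
    simp [pvAtail, pvRepl]
  | succ n ih =>
    intro cs hn h r hl
    cases cs with
    | nil =>
      simp [pvLines] at hl
      obtain ⟨h1, h2⟩ := hl
      subst h1; subst h2
      simp [pvAtail, pvRepl]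
    | cons c t =>
      have hnt : t.length ≤ n := by simpa using Nat.le_of_succ_le_succ hn
      by_cases hc : c = '\n'
      · subst hc
        simp only [pvLines, if_pos rfl] at hl
        cases hl' : pvLines t with
        | nil => exact absurd hl' (pvLines_ne_nil t)
        | cons h' r' =>
          rw [hl'] at hl
          have h1' : h = [] := ((List.cons.inj hl).1).symm
          have h2' : r = h' :: r' := ((List.cons.inj hl).2).symm
          rw [h1', h2']
          have ihm := ih t hnt h' r' hl'
          have hpm := pvPrefix_head t pvPat0 pvPat0_no_nl
          rw [hl'] at hpm
          simp only [List.headI] at hpm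
          by_cases hsw : pvPat0.isPrefixOf h' = true
          · have hpt : pvPat0.isPrefixOf t = true := by rw [hpm]; exact hsw
            rw [pvRepl, if_pos (by simp [pvPat]; simpa using hpt)]
            have hdrop : t.drop 10 = t.drop pvPat0.length := by simp [pvPat0]
            rw [hdrop, pvRep_eq_sep4_pat0, List.append_assoc,
              ← pvRepl_prefix pvPat0 t pvPat0_no_nl hpt, ← ihm]
            have hsw' : pvPat0 <+: h' := by simpa using hsw
            simp [pvAtail, hsw', List.append_assoc]
          · have hpt : pvPat0.isPrefixOf t ≠ true := by rw [hpm]; exact hsw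
            have hpt' : ¬ pvPat0 <+: t := by simpa using hpt
            rw [pvRepl, if_neg (by simp [pvPat]; simpa using hpt')]
            rw [← ihm]
            have hsw' : ¬ pvPat0 <+: h' := by simpa using hsw
            simp [pvAtail, hsw']
      · simp only [pvLines, if_neg hc] at hl
        cases hl' : pvLines t with
        | nil => exact absurd hl' (pvLines_ne_nil t)
        | cons h' r' =>
          rw [hl'] at hl
          simp only [pvPre1] at hl
          have h1 : h = c :: h' := ((List.cons.inj hl).1).symm
          have h2 : r = r' := ((List.cons.inj hl).2).symm
          rw [h1, h2]
          have ihm := ih t hnt h' r' hl'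
          rw [pvRepl, if_neg (by simp [pvPat, List.isPrefixOf]; intro h; exact absurd h.symm hc)]
          rw [← ihm]
          simp

lemma pvMain (cs : List Char) (h : List Char) (r : List (List Char))
    (hl : pvLines cs = h :: r) : h ++ pvAtail r = pvRepl cs :=
  pvMainAux cs.length cs (le_refl _) h r hl

-- the fold over the tail (indices ≥ 1) flattens to grouped blocks
def pvBlock (l : List Char) : List (List Char) :=
  (if pvPat0.isPrefixOf l then [[], pvEq80, []] else []) ++ [l]

lemma pvFold_tail : ∀ (r : List (List Char)) (acc : List (List Char)) (i : Int), 1 ≤ i →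
    (PySem.List.enumerate r i).foldl
      (fun acc il =>
        let acc :=
          if PySem.Chars.startswith il.2 pvPat0 then
            if il.1 > 0 then acc ++ [[], pvEq80, []] else acc
          else acc
        acc ++ [il.2]) acc = acc ++ r.flatMap pvBlock := by
  intro r
  induction r with
  | nil => intro acc i _; simp [PySem.List.enumerate]
  | cons l r' ih =>
    intro acc i hi
    rw [PySem.List.enumerate_cons]
    simp only [List.foldl_cons]
    rw [ih _ (i + 1) (by omega)]
    have hi' : i > 0 := by omega
    simp only [PySem.Chars.startswith]
    by_cases hsw : pvPat0.isPrefixOf l = true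
    · simp [hsw, hi', pvBlock, List.flatMap_cons]
    · simp only [Bool.not_eq_true] at hsw
      simp [hsw, pvBlock, List.flatMap_cons]

-- joining with '\n' after the first element
lemma pvJoin_cons : ∀ (ls : List (List Char)) (h : List Char),
    PySem.Chars.join ['\n'] (h :: ls) = h ++ ls.flatMap (fun x => '\n' :: x) := by
  intro ls
  induction ls with
  | nil => intro h; simp [PySem.Chars.join, List.intercalate]
  | cons y ys ih =>
    intro h
    have hy := ih y
    simp only [PySem.Chars.join, List.intercalate] at hy ⊢
    rw [List.intersperse_cons₂, List.flatten_cons, List.flatten_cons, hy]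
    simp [List.flatMap_cons]

lemma pvFlat_block (r : List (List Char)) :
    (r.flatMap pvBlock).flatMap (fun x => '\n' :: x) = pvAtail r := by
  induction r with
  | nil => simp [pvAtail]
  | cons l r' ih =>
    simp only [List.flatMap_cons, List.flatMap_append, pvAtail] at ih ⊢
    rw [ih]
    by_cases hsw : pvPat0.isPrefixOf l = true
    · simp [pvBlock, hsw, pvSep4]
    · simp only [Bool.not_eq_true] at hsw
      simp [pvBlock, hsw]

-- A on a char list equals the replace recursion
lemma pvA_eq_repl (cs : List Char) :
    PySem.Chars.join ['\n']
      ((PySem.List.enumerate (PySem.Chars.splitOn cs ['\n'])).foldl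
        (fun acc il =>
          let acc :=
            if PySem.Chars.startswith il.2 pvPat0 then
              if il.1 > 0 then acc ++ [[], pvEq80, []] else acc
            else acc
          acc ++ [il.2]) []) = pvRepl cs := by
  rw [pvSplitOn_eq]
  cases hl : pvLines cs with
  | nil => exact absurd hl (pvLines_ne_nil cs)
  | cons h r =>
    rw [PySem.List.enumerate_cons]
    simp only [List.foldl_cons]
    have hstep :
        (let acc := if PySem.Chars.startswith h pvPat0 then
            if (0 : Int) > 0 then ([] : List (List Char)) ++ [[], pvEq80, []] else []
          else []
         acc ++ [h]) = [h] := by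
      simp only []
      split <;> simp
    rw [show (0 : Int) + 1 = 1 from rfl]
    rw [hstep, pvFold_tail r [h] 1 (le_refl _), List.singleton_append, pvJoin_cons]
    rw [pvFlat_block]
    exact pvMain cs h r hl

-- ===== VERDICT (by name: the statement is the Claim_ definition above) =====
theorem enhance_diff_formatting_py_spec : Claim_equal_enhance_diff_formatting_py := by
  intro diff_text _
  unfold Spec_enhance_diff_formatting_py enhance_diff_formatting_py enhance_diff_formatting_py_alt
  by_cases he : diff_text == ""
  · simp [he]
  · simp only [he, if_false, Bool.false_eq_true]
    rw [PySem.Str.replace]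
    have hpat : ("\ndiff --git" : String).toList = pvPat := by decide
    have hrep : (String.ofList ('\n' :: '\n' :: (List.replicate 80 '=' ++ '\n' :: '\n' :: "diff --git".toList))).toList = pvRep := by decide
    rw [hpat, hrep, pvReplace_eq]
    have := pvA_eq_repl diff_text.toList
    simp only [pvPat0, pvEq80] at this
    rw [this]
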